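-- pv_equiv track=rewrite | github.com/IbrahmMhammad/ErrorCorrectionCode | ErrorCorrectionCode.py | detect_error
-- ===== SOURCE A (Python) =====
-- def detect_error(code, r):
--     n = len(code)
--     res = 0
--     for i in range(r):
--         val = 0
--         for j in range(1, n + 1):
--             if j & (2**i) == (2**i):
--                 val = val ^ int(code[-1 * j])
--         res = res + val*(10**i)
--     return int(str(res), 2)
-- ===== SOURCE B (Python) =====
-- def detect_error(code, r):
--     # Scatter: one pass over positions j=1..n; the digit is read once per
--     # position (only when some parity bit < r covers it) and XORed into every
--     # accumulator val[i] whose bit i is set in j; then combined as A does.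
--     n = len(code)
--     val = {}
--     for j in range(1, n + 1):
--         d = None
--         m, i = j, 0
--         while m and i < r:
--             if m & 1:
--                 if d is None:
--                     d = int(code[-j])
--                 val[i] = val.get(i, 0) ^ d
--             m //= 2
--             i += 1
--     res = 0
--     for i in range(r):
--         res += val.get(i, 0) * 10 ** i
--     return int(str(res), 2)
-- ===== Notes on version B (the rewrite author's own statement) =====
-- stated objective: alternative
-- what changed: Gather (outer loop over r parity bits, each rescanning all n positions) replaced by scatter: one pass over positions j=1..n that reads each covered digit once and XORs it into a dict of per-bit accumulators, combined at the end exactly as A packs them.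
-- outside the precondition, e.g. on detect_error('a0', 1): A returns 0, B returns 0; on detect_error('308', 1): A returns 3, B returns 3
import Mathlib
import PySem

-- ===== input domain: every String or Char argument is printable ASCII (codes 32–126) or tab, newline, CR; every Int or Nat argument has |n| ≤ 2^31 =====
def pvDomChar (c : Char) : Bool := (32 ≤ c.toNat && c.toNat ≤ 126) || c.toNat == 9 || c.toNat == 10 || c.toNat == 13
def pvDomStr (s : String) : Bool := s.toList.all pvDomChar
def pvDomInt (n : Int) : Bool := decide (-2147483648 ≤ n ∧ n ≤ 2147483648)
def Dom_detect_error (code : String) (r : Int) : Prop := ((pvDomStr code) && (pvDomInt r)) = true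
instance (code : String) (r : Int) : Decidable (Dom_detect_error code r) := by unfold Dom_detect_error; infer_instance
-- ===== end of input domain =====

-- B restructures A's gather (outer loop over r parity bits, each rescanning all n positions)
-- into a scatter: one pass over positions j=1..n, XORing each digit into per-bit accumulators.
-- Equivalence of the RETURN value is proved on Pre_ (binary codewords, or r ≤ 0).

-- shared helper: Python's int(code[-j]) (A writes code[-1*j], the same index);
-- the default 0 is never reached inside Pre_ (there the index is in range and the char a digit)
def pvDigit (code : String) (j : Int) : Int :=
  ((PySem.Str.pyGet? code (-j)).bind (fun c => PySem.Int.ofChars? [c])).getD 0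

-- ===== PORT A =====
def detect_error (code : String) (r : Int) : Int :=
  let n : Int := PySem.Str.len code
  let res : Int :=
    (PySem.List.pyRange 0 r 1).foldl
      (fun res i =>
        let val : Int :=
          (PySem.List.pyRange 1 (n + 1) 1).foldl
            (fun val j =>
              if PySem.Int.band j ((2 : Int) ^ i.toNat) = (2 : Int) ^ i.toNat then
                PySem.Int.bxor val (pvDigit code j)
              else val) 0
        res + val * (10 : Int) ^ i.toNat) 0
  -- int(str(res), 2); inside Pre_ the parse succeeds
  (PySem.Int.ofStrBase? (PySem.Int.toStr res) 2).getD 0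

-- ===== PORT B =====
-- the inner `while m and i < r` loop of Source B; m = j ≥ 1 at every call, so Python's
-- `while m` is `1 ≤ m` there (written so for termination)
def pvScatter (code : String) (r j : Int) (m i : Int) (d : Option Int)
    (val : PySem.Dict Int Int) : PySem.Dict Int Int :=
  if h : 1 ≤ m ∧ i < r then
    if PySem.Int.band m 1 ≠ 0 then
      let d' : Int := match d with | none => pvDigit code j | some x => x
      pvScatter code r j (PySem.Int.floordiv m 2) (i + 1) (some d')
        (val.insert i (PySem.Int.bxor (val.getD i 0) d'))
    else
      pvScatter code r j (PySem.Int.floordiv m 2) (i + 1) d val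
  else val
termination_by m.toNat
decreasing_by
  all_goals
    have h1 : PySem.Int.floordiv m 2 < m :=
      (PySem.Int.floordiv_lt_iff_lt_mul (by omega)).mpr (by omega)
    omega

def detect_error_alt (code : String) (r : Int) : Int :=
  let n : Int := PySem.Str.len code
  let val : PySem.Dict Int Int :=
    (PySem.List.pyRange 1 (n + 1) 1).foldl
      (fun val j => pvScatter code r j j 0 none val) PySem.Dict.empty
  let res : Int :=
    (PySem.List.pyRange 0 r 1).foldl
      (fun res i => res + val.getD i 0 * (10 : Int) ^ i.toNat) 0
  (PySem.Int.ofStrBase? (PySem.Int.toStr res) 2).getD 0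

-- ===== PRECONDITION & SPEC =====
-- Pre_ excludes codes containing characters other than '0'/'1' when r > 0: there A
-- almost always raises ValueError (int() of a non-digit, or int(·,2) of a non-binary
-- decimal packing), and where it happens to return, the value is an accident of that
-- packing (B returns the same value there, but it is outside the claim).
def Pre_detect_error (code : String) (r : Int) : Prop :=
  r ≤ 0 ∨ code.toList.all (fun c => c == '0' || c == '1') = true
instance (code : String) (r : Int) : Decidable (Pre_detect_error code r) := by
  unfold Pre_detect_error; infer_instance
def pvWitness_detect_error : String × Int := ("1011010", 3)

def Spec_detect_error (code : String) (r : Int) (out : Int) : Prop := out = detect_error_alt code r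
instance (code : String) (r : Int) (out : Int) : Decidable (Spec_detect_error code r out) := by
  unfold Spec_detect_error; infer_instance

-- ===== CLAIM (what is proved, stated in full; the proofs are below) =====
def Claim_equal_detect_error : Prop := ∀ (code : String) (r : Int), Dom_detect_error code r → Pre_detect_error code r → Spec_detect_error code r (detect_error code r)

-- ===== LEMMAS AND PROOFS =====

theorem pvFloordivTwo (mN : Nat) : PySem.Int.floordiv (mN : Int) 2 = ((mN / 2 : Nat) : Int) := by
  have h1 : PySem.Int.floordiv (mN : Int) 2 < ((mN / 2 : Nat) : Int) + 1 :=
    (PySem.Int.floordiv_lt_iff_lt_mul (by omega)).mpr (by omega)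
  have h2 : ((mN / 2 : Nat) : Int) ≤ PySem.Int.floordiv (mN : Int) 2 :=
    (PySem.Int.le_floordiv_iff_mul_le (by omega)).mpr (by omega)
  omega

theorem pvBandOne (mN : Nat) : PySem.Int.band (mN : Int) 1 = ((mN % 2 : Nat) : Int) := by
  have : ((1 : Nat) : Int) = (1 : Int) := rfl
  rw [← this, PySem.Int.band_natCast, Nat.and_one_is_mod]

theorem pvScatter_getD (code : String) (r j : Int) (mN : Nat) (i₀ : Int) (d : Option Int)
    (hd : d = none ∨ d = some (pvDigit code j)) (val : PySem.Dict Int Int) (k : Int) :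
    (pvScatter code r j (mN : Int) i₀ d val).getD k 0 =
      if i₀ ≤ k ∧ k < r ∧ mN.testBit (k - i₀).toNat = true then
        PySem.Int.bxor (val.getD k 0) (pvDigit code j)
      else val.getD k 0 := by
  induction mN using Nat.strong_induction_on generalizing i₀ d val with
  | _ mN ih =>
    by_cases hg : 1 ≤ (mN : Int) ∧ i₀ < r
    · rw [pvScatter.eq_def, dif_pos hg, pvBandOne, pvFloordivTwo]
      have hmpos : 0 < mN := by omega
      have hdiv : mN / 2 < mN := Nat.div_lt_self hmpos (by omega)
      by_cases hodd : mN % 2 = 1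
      · have hb : ((mN % 2 : Nat) : Int) ≠ 0 := by omega
        rw [if_pos hb]
        have tail : (pvScatter code r j ((mN / 2 : Nat) : Int) (i₀ + 1)
            (some (pvDigit code j))
            (val.insert i₀ (PySem.Int.bxor (val.getD i₀ 0) (pvDigit code j)))).getD k 0 =
            (if i₀ ≤ k ∧ k < r ∧ mN.testBit (k - i₀).toNat = true then
              PySem.Int.bxor (val.getD k 0) (pvDigit code j) else val.getD k 0) := by
          rw [ih (mN / 2) hdiv (i₀ + 1) (some (pvDigit code j)) (Or.inr rfl)]
          rcases lt_trichotomy k i₀ with hk | hk | hk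
          · rw [if_neg (by omega), if_neg (by omega),
              PySem.Dict.getD_insert, if_neg (by omega)]
          · subst hk
            rw [if_neg (by omega), if_pos ⟨le_refl _, hg.2, by
                simpa [Nat.testBit_zero] using hodd⟩,
              PySem.Dict.getD_insert, if_pos rfl]
          · have ht : (k - i₀).toNat = (k - (i₀ + 1)).toNat + 1 := by omega
            have hv : (val.insert i₀ (PySem.Int.bxor (val.getD i₀ 0) (pvDigit code j))).getD k 0 =
                val.getD k 0 := by
              rw [PySem.Dict.getD_insert, if_neg (show ¬ k = i₀ by omega)]
            have hTT : mN.testBit (k - i₀).toNat = (mN / 2).testBit (k - (i₀ + 1)).toNat := by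
              rw [ht, Nat.testBit_add_one]
            rw [hv, hTT]
            by_cases hT : (mN / 2).testBit (k - (i₀ + 1)).toNat = true
            · by_cases hkr : k < r
              · rw [if_pos ⟨by omega, hkr, hT⟩, if_pos ⟨by omega, hkr, hT⟩]
              · rw [if_neg (by tauto), if_neg (by tauto)]
            · rw [if_neg (by tauto), if_neg (by tauto)]
        rcases hd with rfl | rfl
        · exact tail
        · exact tail
      · have hb : ((mN % 2 : Nat) : Int) = 0 := by omega
        rw [if_neg (fun hcc => hcc hb)]
        rw [ih (mN / 2) hdiv (i₀ + 1) d hd]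
        rcases lt_trichotomy k i₀ with hk | hk | hk
        · rw [if_neg (by omega), if_neg (by omega)]
        · subst hk
          rw [if_neg (by omega), if_neg (by
            rintro ⟨-, -, h3⟩
            rw [show (k - k).toNat = 0 from by omega, Nat.testBit_zero] at h3
            simp at h3; omega)]
        · have hTT : mN.testBit (k - i₀).toNat = (mN / 2).testBit (k - (i₀ + 1)).toNat := by
            rw [show (k - i₀).toNat = (k - (i₀ + 1)).toNat + 1 from by omega, Nat.testBit_add_one]
          rw [hTT]
          by_cases hT : (mN / 2).testBit (k - (i₀ + 1)).toNat = true
          · by_cases hkr : k < r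
            · rw [if_pos ⟨by omega, hkr, hT⟩, if_pos ⟨by omega, hkr, hT⟩]
            · rw [if_neg (by tauto), if_neg (by tauto)]
          · rw [if_neg (by tauto), if_neg (by tauto)]
    · rw [pvScatter.eq_def, dif_neg hg, if_neg]
      rintro ⟨h1, h2, h3⟩
      by_cases hm : mN = 0
      · subst hm; simp [Nat.zero_testBit] at h3
      · exact hg ⟨by omega, by omega⟩

theorem pvFoldScatter (code : String) (r : Int) (L : List Int) (hL : ∀ j ∈ L, 0 ≤ j)
    (val : PySem.Dict Int Int) (k : Int) :
    (L.foldl (fun v j => pvScatter code r j j 0 none v) val).getD k 0 =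
      L.foldl
        (fun v j =>
          if 0 ≤ k ∧ k < r ∧ j.toNat.testBit k.toNat = true then
            PySem.Int.bxor v (pvDigit code j)
          else v)
        (val.getD k 0) := by
  induction L generalizing val with
  | nil => rfl
  | cons j L ih =>
    simp only [List.foldl_cons]
    rw [ih (fun x hx => hL x (List.mem_cons_of_mem _ hx))]
    have h0 : (0 : Int) ≤ j := hL j (List.mem_cons_self ..)
    have hjj : ((j.toNat : Nat) : Int) = j := by omega
    have hsc := pvScatter_getD code r j j.toNat 0 none (Or.inl rfl) val k
    rw [hjj] at hsc
    rw [hsc]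
    congr 1
    simp only [Int.sub_zero]

theorem pvCondIff (a t : Nat) :
    (PySem.Int.band (a : Int) ((2 : Int) ^ t) = (2 : Int) ^ t) ↔ a.testBit t = true := by
  have h2 : ((2 : Int) ^ t) = ((2 ^ t : Nat) : Int) := by push_cast; ring
  rw [h2, PySem.Int.band_natCast, Int.natCast_inj, Nat.and_two_pow]
  constructor
  · intro h
    cases hb : a.testBit t
    · rw [hb] at h
      simp only [Bool.toNat_false, Nat.zero_mul] at h
      exact absurd h.symm (Nat.two_pow_pos t).ne'
    · rfl
  · intro h
    rw [h]
    simp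

theorem pvInnerEq (code : String) (r n k : Int) (hk0 : 0 ≤ k) (hkr : k < r) :
    ((PySem.List.pyRange 1 (n + 1) 1).foldl
        (fun val j =>
          if PySem.Int.band j ((2 : Int) ^ k.toNat) = (2 : Int) ^ k.toNat then
            PySem.Int.bxor val (pvDigit code j)
          else val) 0) =
      ((PySem.List.pyRange 1 (n + 1) 1).foldl
        (fun v j =>
          if 0 ≤ k ∧ k < r ∧ j.toNat.testBit k.toNat = true then
            PySem.Int.bxor v (pvDigit code j)
          else v) 0) := by
  apply PySem.List.foldl_congr_mem
  intro acc j hj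
  have hj1 : 1 ≤ j := ((PySem.List.mem_pyRange_one).mp hj).1
  have hja : ((j.toNat : Nat) : Int) = j := by omega
  have hcond := pvCondIff j.toNat k.toNat
  rw [hja] at hcond
  by_cases hc : j.toNat.testBit k.toNat = true
  · rw [if_pos (hcond.mpr hc), if_pos ⟨hk0, hkr, hc⟩]
  · rw [if_neg (fun h => hc (hcond.mp h)), if_neg (fun h => hc h.2.2)]

-- ===== VERDICT (by name: the statement is the Claim_ definition above) =====
set_option maxHeartbeats 1000000 in
theorem detect_error_spec : Claim_equal_detect_error := by
  intro code r _hdom _hpre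
  unfold Spec_detect_error
  simp only [detect_error, detect_error_alt]
  apply congrArg (fun z : Int => (PySem.Int.ofStrBase? (PySem.Int.toStr z) 2).getD 0)
  apply PySem.List.foldl_congr_mem
  intro acc i hi
  have hi' := (PySem.List.mem_pyRange_one).mp hi
  have h2 := pvFoldScatter code r (PySem.List.pyRange 1 (PySem.Str.len code + 1) 1)
    (fun j hj => by have := (PySem.List.mem_pyRange_one).mp hj; omega)
    PySem.Dict.empty i
  rw [PySem.Dict.getD_empty] at h2
  rw [pvInnerEq code r (PySem.Str.len code) i hi'.1 hi'.2, h2]
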